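-- pv_equiv track=rewrite | github.com/aviswerdlow/k4 | experiments/alternates/scripts/confirm_and_nulls.py | tokenize_head
-- ===== SOURCE A (Python) =====
-- def tokenize_head(head, cuts):
--     """Tokenize head using canonical cuts."""
--     tokens = []
--     prev = 0
--
--     for cut in sorted(cuts):
--         if cut > len(head):
--             break
--         if cut > prev:
--             token = head[prev:cut].strip()
--             if token:
--                 tokens.append(token)
--             prev = cut
--
--     # Add final token if any
--     if prev < len(head):
--         token = head[prev:].strip()
--         if token:
--             tokens.append(token)
--
--     return tokens
-- ===== SOURCE B (Python) =====
-- def tokenize_head(head, cuts):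
--     """Tokenize head using canonical cuts."""
--     bset = set(cuts)
--     out = []
--     buf = []
--     for i, ch in enumerate(head):
--         if i in bset:
--             t = ''.join(buf).strip()
--             if t:
--                 out.append(t)
--             buf = [ch]
--         else:
--             buf.append(ch)
--     t = ''.join(buf).strip()
--     if t:
--         out.append(t)
--     return out
-- ===== Notes on version B (the rewrite author's own statement) =====
-- stated objective: alternative
-- what changed: A sorts the cuts and slices the string segment by segment with a running prev index; B never sorts or slices: it puts the cuts in a hash set and makes one character-by-character scan of head, flushing the accumulated buffer whenever the current index is a cut, so boundary selection (in-range, dedup, increasing) falls out of the scan order instead of sort+compare logic.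
import Mathlib
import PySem

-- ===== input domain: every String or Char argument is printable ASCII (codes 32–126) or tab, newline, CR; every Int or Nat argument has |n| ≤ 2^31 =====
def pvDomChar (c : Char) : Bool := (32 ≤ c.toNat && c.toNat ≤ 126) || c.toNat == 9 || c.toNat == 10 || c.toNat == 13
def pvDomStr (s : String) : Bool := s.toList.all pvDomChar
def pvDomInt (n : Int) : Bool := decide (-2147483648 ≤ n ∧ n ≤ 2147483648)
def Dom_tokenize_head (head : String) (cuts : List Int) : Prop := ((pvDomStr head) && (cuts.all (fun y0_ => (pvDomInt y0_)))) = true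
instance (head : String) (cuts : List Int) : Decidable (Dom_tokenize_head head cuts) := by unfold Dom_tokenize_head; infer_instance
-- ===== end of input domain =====

-- B replaces A's sort-the-cuts-then-slice loop by a sortless single character scan of head
-- that flushes an accumulator whenever the index lies in the set of cuts (alternative algorithm).

-- ===== PORT A =====
-- the code after A's loop: final token if prev < len(head)
def tokAfin (head : String) (prev : Int) (tokens : List String) : List String :=
  if prev < PySem.Str.len head then
    let token := PySem.Str.strip (PySem.Str.slice head (some prev) none)
    if token ≠ "" then tokens ++ [token] else tokens
  else tokens

-- A's for-loop over sorted(cuts), with 'break' falling through to the final-token code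
def tokAloop (head : String) (s : List Int) (prev : Int) (tokens : List String) : List String :=
  match s with
  | [] => tokAfin head prev tokens
  | cut :: rest =>
    if PySem.Str.len head < cut then tokAfin head prev tokens
    else if prev < cut then
      let token := PySem.Str.strip (PySem.Str.slice head (some prev) (some cut))
      tokAloop head rest cut (if token ≠ "" then tokens ++ [token] else tokens)
    else tokAloop head rest prev tokens

def tokenize_head (head : String) (cuts : List Int) : List String :=
  tokAloop head (PySem.List.sorted cuts (fun x => x) false) 0 []

-- ===== PORT B =====
-- one step of B's scan: flush the buffer at a cut index, else extend it
def tokBstep (bset : PySem.Set Int) (st : List String × List Char) (ic : Int × Char) :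
    List String × List Char :=
  if PySem.Set.contains bset ic.1 then
    let t := PySem.Str.strip (String.ofList st.2)
    ((if t ≠ "" then st.1 ++ [t] else st.1), [ic.2])
  else (st.1, st.2 ++ [ic.2])

-- B's code after the loop: flush the remaining buffer
def tokBfin (st : List String × List Char) : List String :=
  let t := PySem.Str.strip (String.ofList st.2)
  if t ≠ "" then st.1 ++ [t] else st.1

def tokenize_head_alt (head : String) (cuts : List Int) : List String :=
  let bset := PySem.Set.ofList cuts
  tokBfin ((PySem.List.enumerate head.toList 0).foldl (tokBstep bset) ([], []))

-- ===== PRECONDITION & SPEC =====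
def Spec_tokenize_head (head : String) (cuts : List Int) (out : List String) : Prop := out = tokenize_head_alt head cuts
instance (head : String) (cuts : List Int) (out : List String) : Decidable (Spec_tokenize_head head cuts out) := by unfold Spec_tokenize_head; infer_instance

-- ===== CLAIM (what is proved, stated in full; the proofs are below) =====
def Claim_equal_tokenize_head : Prop := ∀ (head : String) (cuts : List Int), Dom_tokenize_head head cuts → Spec_tokenize_head head cuts (tokenize_head head cuts)

-- ===== LEMMAS AND PROOFS =====

-- the (possibly empty) token contributed by the segment [a,b) of head
def optTok (head : String) (a b : Int) : List String :=
  let t := PySem.Str.strip (PySem.Str.slice head (some a) (some b))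
  if t ≠ "" then [t] else []

-- tokens of the segments delimited by p, the boundary list, and len(head)
def chainTok (head : String) (p : Int) : List Int → List String
  | [] => optTok head p (PySem.Str.len head)
  | b :: bs => optTok head p b ++ chainTok head b bs

-- the cut positions A actually uses: strictly increasing, in (p, n]
def sel (n : Int) (p : Int) : List Int → List Int
  | [] => []
  | c :: r => if n < c then [] else if p < c then c :: sel n c r else sel n p r

theorem sel_gt (n : Int) : ∀ (s : List Int) (p a : Int), a ∈ sel n p s → p < a := by
  intro s
  induction s with
  | nil => intro p a ha; simp [sel] at ha
  | cons c r ih =>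
    intro p a ha
    simp only [sel] at ha
    split_ifs at ha with h1 h2
    · simp at ha
    · rcases List.mem_cons.mp ha with rfl | hm
      · exact h2
      · exact lt_trans h2 (ih c a hm)
    · exact ih p a ha

theorem sel_nodup (n : Int) : ∀ (s : List Int) (p : Int), (sel n p s).Pairwise (· < ·) := by
  intro s
  induction s with
  | nil => intro p; simp [sel]
  | cons c r ih =>
    intro p
    simp only [sel]
    split_ifs with h1 h2
    · simp
    · exact List.Pairwise.cons (fun a ha => sel_gt n r c a ha) (ih c)
    · exact ih p

theorem mem_sel (n : Int) : ∀ (s : List Int) (p a : Int), s.Pairwise (· ≤ ·) →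
    (a ∈ sel n p s ↔ a ∈ s ∧ p < a ∧ a ≤ n) := by
  intro s
  induction s with
  | nil => intro p a _; simp [sel]
  | cons c r ih =>
    intro p a hp
    have hcr : ∀ x ∈ r, c ≤ x := fun x hx => (List.pairwise_cons.mp hp).1 x hx
    have hr : r.Pairwise (· ≤ ·) := (List.pairwise_cons.mp hp).2
    simp only [sel]
    split_ifs with h1 h2
    · constructor
      · intro h; simp at h
      · rintro ⟨hmem, _, hle⟩
        rcases List.mem_cons.mp hmem with rfl | hm
        · omega
        · have := hcr a hm; omega
    · rw [List.mem_cons, ih c a hr]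
      constructor
      · rintro (rfl | ⟨hm, hca, hle⟩)
        · exact ⟨List.mem_cons_self, h2, by omega⟩
        · exact ⟨List.mem_cons_of_mem _ hm, by omega, hle⟩
      · rintro ⟨hmem, hpa, hle⟩
        rcases List.mem_cons.mp hmem with rfl | hm
        · exact Or.inl rfl
        · have hca := hcr a hm
          rcases eq_or_lt_of_le hca with rfl | hlt
          · exact Or.inl rfl
          · exact Or.inr ⟨hm, hlt, hle⟩
    · rw [ih p a hr]
      constructor
      · rintro ⟨hm, hpa, hle⟩; exact ⟨List.mem_cons_of_mem _ hm, hpa, hle⟩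
      · rintro ⟨hmem, hpa, hle⟩
        rcases List.mem_cons.mp hmem with rfl | hm
        · omega
        · exact ⟨hm, hpa, hle⟩

theorem optTok_self (head : String) (p : Int) (hp : p = PySem.Str.len head) :
    optTok head p p = [] := by
  have ht : (PySem.Str.strip (PySem.Str.slice head (some p) (some p))).toList = [] := by
    simp only [PySem.Str.toList_strip, PySem.Str.toList_slice, PySem.Chars.slice_eq_listSlice]
    have h0 : (0:Int) ≤ p := by simp [hp, PySem.Str.len_eq]
    rw [PySem.List.slice_toNat head.toList h0 h0, Nat.sub_self, List.take_zero]
    rfl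
  have hemp : PySem.Str.strip (PySem.Str.slice head (some p) (some p)) = "" :=
    String.toList_eq_nil_iff.mp ht
  simp [optTok, hemp]

theorem slice_from_eq_slice_len (head : String) (p : Int) (h0 : 0 ≤ p) :
    PySem.Str.slice head (some p) none = PySem.Str.slice head (some p) (some (PySem.Str.len head)) := by
  apply String.toList_inj.mp
  simp only [PySem.Str.toList_slice, PySem.Chars.slice_eq_listSlice]
  rw [PySem.List.slice_from head.toList h0,
      PySem.List.slice_toNat head.toList h0 (by simp [PySem.Str.len_eq])]
  have hlen : (PySem.Str.len head).toNat = head.toList.length := by simp [PySem.Str.len_eq]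
  rw [hlen, List.take_of_length_le (by simp)]

theorem tokAfin_eq (head : String) (p : Int) (tokens : List String)
    (h0 : 0 ≤ p) (hle : p ≤ PySem.Str.len head) :
    tokAfin head p tokens = tokens ++ chainTok head p [] := by
  simp only [tokAfin, chainTok]
  rcases eq_or_lt_of_le hle with heq | hlt
  · rw [if_neg (by omega)]
    rw [heq] at h0 ⊢
    rw [optTok_self head _ rfl]
    simp
  · rw [if_pos hlt]
    rw [slice_from_eq_slice_len head p h0]
    simp only [optTok]
    split_ifs <;> simp

theorem tokAloop_eq (head : String) : ∀ (s : List Int) (p : Int) (tokens : List String),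
    s.Pairwise (· ≤ ·) → 0 ≤ p → p ≤ PySem.Str.len head →
    tokAloop head s p tokens = tokens ++ chainTok head p (sel (PySem.Str.len head) p s) := by
  intro s
  induction s with
  | nil => intro p tokens _ h0 hle; simp only [tokAloop, sel]; exact tokAfin_eq head p tokens h0 hle
  | cons c r ih =>
    intro p tokens hp h0 hle
    have hr : r.Pairwise (· ≤ ·) := (List.pairwise_cons.mp hp).2
    simp only [tokAloop, sel]
    by_cases h1 : PySem.Str.len head < c
    · simp only [if_pos h1]; exact tokAfin_eq head p tokens h0 hle
    · by_cases h2 : p < c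
      · simp only [if_neg h1, if_pos h2]
        rw [ih c _ hr (by omega) (by omega)]
        simp only [chainTok, optTok]
        by_cases ht : PySem.Str.strip (PySem.Str.slice head (some p) (some c)) ≠ "" <;>
          simp [ht]
      · simp only [if_neg h1, if_neg h2]
        exact ih p tokens hr h0 hle

-- dropping a boundary equal to len(head) does not change the token chain
theorem chainTok_filter (head : String) : ∀ (l : List Int) (p : Int),
    l.Pairwise (· < ·) → (∀ b ∈ l, b ≤ PySem.Str.len head) →
    chainTok head p l = chainTok head p (l.filter (fun b => decide (b < PySem.Str.len head))) := by
  intro l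
  induction l with
  | nil => intro p _ _; rfl
  | cons b bs ih =>
    intro p hp hle
    have hbs : bs.Pairwise (· < ·) := (List.pairwise_cons.mp hp).2
    by_cases hb : b < PySem.Str.len head
    · rw [List.filter_cons_of_pos (by simpa using hb)]
      simp only [chainTok]
      rw [ih b hbs (fun x hx => hle x (List.mem_cons_of_mem _ hx))]
    · have hbn : b = PySem.Str.len head := le_antisymm (hle b List.mem_cons_self) (by omega)
      have hnil : bs = [] := by
        cases bs with
        | nil => rfl
        | cons x xs =>
          have h1 : b < x := (List.pairwise_cons.mp hp).1 x List.mem_cons_self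
          have h2 : x ≤ PySem.Str.len head := hle x (List.mem_cons_of_mem _ List.mem_cons_self)
          omega
      subst hnil
      rw [List.filter_cons_of_neg (by simpa using hb), List.filter_nil]
      simp only [chainTok]
      rw [← hbn, optTok_self head b hbn]
      simp

-- a token from a (Nat-indexed) buffer slice equals optTok of the corresponding slice
theorem strip_mk_seg (head : String) (s b : Nat) :
    PySem.Str.strip (String.ofList ((head.toList.drop s).take (b - s)))
      = PySem.Str.strip (PySem.Str.slice head (some (s:Int)) (some (b:Int))) := by
  apply String.toList_inj.mp
  simp only [PySem.Str.toList_strip, PySem.Str.toList_slice, PySem.Chars.slice_eq_listSlice]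
  rw [PySem.List.slice_toNat head.toList (by positivity) (by positivity)]
  rw [String.toList_ofList]
  simp

theorem tokBfin_seg (head : String) (out : List String) (s b : Nat) :
    tokBfin (out, (head.toList.drop s).take (b - s)) = out ++ optTok head (s:Int) (b:Int) := by
  simp only [tokBfin, optTok, strip_mk_seg head s b]
  split_ifs <;> simp

-- a run of indices none of which is a cut just extends the buffer
theorem run_no_cut (bset : PySem.Set Int) : ∀ (ps : List (Int × Char)) (out : List String) (buf : List Char),
    (∀ p ∈ ps, ¬ (p.1 ∈ bset)) →
    ps.foldl (tokBstep bset) (out, buf) = (out, buf ++ ps.map Prod.snd) := by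
  intro ps
  induction ps with
  | nil => intro out buf _; simp
  | cons q qs ih =>
    intro out buf h
    have hq : ¬ (q.1 ∈ bset) := h q List.mem_cons_self
    have hqb : PySem.Set.contains bset q.1 = false := by
      rw [← Bool.not_eq_true, PySem.Set.contains_iff]; exact hq
    simp only [List.foldl_cons, tokBstep, hqb, Bool.false_eq_true, if_false]
    rw [ih _ _ (fun p hp => h p (List.mem_cons_of_mem _ hp))]
    simp

-- main scan invariant: from position p, with buffer = head[s:p], the scan produces
-- exactly the tokens of the segments delimited by the remaining cut boundaries
theorem scan_chain (head : String) (bset : PySem.Set Int) :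
    ∀ (bnds : List Int) (s p : Nat) (out : List String),
    s ≤ p → p ≤ head.toList.length →
    bnds.Pairwise (· < ·) →
    (∀ b ∈ bnds, (p:Int) ≤ b ∧ b < (head.toList.length : Int)) →
    (∀ j : Nat, p ≤ j → j < head.toList.length → ((j:Int) ∈ bset ↔ (j:Int) ∈ bnds)) →
    tokBfin ((PySem.List.enumerate (head.toList.drop p) (p:Int)).foldl (tokBstep bset)
        (out, (head.toList.drop s).take (p - s)))
      = out ++ chainTok head (s:Int) bnds := by
  intro bnds
  induction bnds with
  | nil =>
    intro s p out hsp hpn _ _ hmem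
    rw [run_no_cut bset _ out _ ?nocut]
    · rw [PySem.List.map_snd_enumerate]
      have hdd : head.toList.drop p = (head.toList.drop s).drop (p - s) := by
        rw [List.drop_drop]; congr 1; omega
      rw [hdd, List.take_append_drop]
      have hfull : head.toList.drop s
          = (head.toList.drop s).take (head.toList.length - s) := by
        rw [List.take_of_length_le (by simp)]
      rw [hfull, tokBfin_seg head out s head.toList.length]
      simp only [chainTok, PySem.Str.len_eq]
    case nocut =>
      intro q hq
      rw [PySem.List.mem_enumerate_iff] at hq
      obtain ⟨k, hk, rfl⟩ := hq
      intro hin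
      have hlen : k < head.toList.length - p := by simpa using hk
      have := (hmem (p + k) (by omega) (by omega)).mp (by exact_mod_cast hin)
      simp at this
  | cons b bs ih =>
    intro s p out hsp hpn hpair hrange hmem
    obtain ⟨hpb, hbn⟩ := hrange b List.mem_cons_self
    have hb0 : (0:Int) ≤ b := le_trans (by positivity) hpb
    obtain ⟨bN, rfl⟩ : ∃ k : Nat, b = (k:Int) := ⟨b.toNat, (Int.toNat_of_nonneg hb0).symm⟩
    have hpbN : p ≤ bN := by exact_mod_cast hpb
    have hbNn : bN < head.toList.length := by exact_mod_cast hbn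
    have hbsgt : ∀ x ∈ bs, (bN:Int) < x := fun x hx => (List.pairwise_cons.mp hpair).1 x hx
    -- split the remaining characters at the first boundary bN
    have hsplit : head.toList.drop p
        = (head.toList.drop p).take (bN - p) ++ head.toList.drop bN := by
      conv_lhs => rw [← List.take_append_drop (bN - p) (head.toList.drop p)]
      rw [List.drop_drop]
      congr 2
      omega
    have hlen1 : ((head.toList.drop p).take (bN - p)).length = bN - p := by
      rw [List.length_take, List.length_drop]; omega
    rw [hsplit, PySem.List.enumerate_append, List.foldl_append]
    rw [run_no_cut bset _ out _ ?nocut]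
    · rw [PySem.List.map_snd_enumerate]
      -- the buffer is now head[s:bN]
      have hbuf : (head.toList.drop s).take (p - s) ++ (head.toList.drop p).take (bN - p)
          = (head.toList.drop s).take (bN - s) := by
        have hdd : head.toList.drop p = (head.toList.drop s).drop (p - s) := by
          rw [List.drop_drop]; congr 1; omega
        rw [hdd, ← List.take_add]
        congr 1
        omega
      rw [hbuf, hlen1]
      -- the next character sits at index bN and is a cut: flush
      have hcons : head.toList.drop bN = head.toList[bN] :: head.toList.drop (bN + 1) :=
        List.drop_eq_getElem_cons hbNn
      have hstart : (p:Int) + ((bN : Nat) - p : Nat) = (bN:Int) := by omega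
      rw [hstart, hcons, PySem.List.enumerate_cons, List.foldl_cons]
      have hinb : PySem.Set.contains bset (bN:Int) = true := by
        rw [PySem.Set.contains_iff]
        exact (hmem bN hpbN hbNn).mpr List.mem_cons_self
      have hstep : tokBstep bset (out, (head.toList.drop s).take (bN - s)) ((bN:Int), head.toList[bN])
          = (out ++ optTok head (s:Int) (bN:Int), [head.toList[bN]]) := by
        simp only [tokBstep, hinb, if_true, optTok, strip_mk_seg head s bN]
        split_ifs <;> simp
      rw [hstep]
      -- restart the invariant after the flush
      have hsingle : [head.toList[bN]] = (head.toList.drop bN).take (bN + 1 - bN) := by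
        rw [show bN + 1 - bN = 1 from by omega, hcons, List.take_succ_cons, List.take_zero]
      have hstart2 : (bN:Int) + 1 = ((bN + 1 : Nat) : Int) := by norm_cast
      rw [hsingle, hstart2, show head.toList.drop (bN+1) = head.toList.drop (bN+1) from rfl]
      rw [ih bN (bN + 1) (out ++ optTok head (s:Int) (bN:Int)) (by omega) (by omega)
        (List.pairwise_cons.mp hpair).2
        (fun x hx => ⟨by have := hbsgt x hx; push_cast; omega, (hrange x (List.mem_cons_of_mem _ hx)).2⟩)
        ?mem2]
      · simp only [chainTok, List.append_assoc]
      case mem2 =>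
        intro j hj1 hj2
        rw [hmem j (by omega) hj2, List.mem_cons]
        constructor
        · rintro (hbad | h)
          · exfalso
            have : j = bN := by exact_mod_cast hbad
            omega
          · exact h
        · intro h; exact Or.inr h
    case nocut =>
      intro q hq
      rw [PySem.List.mem_enumerate_iff] at hq
      obtain ⟨k, hk, rfl⟩ := hq
      intro hin
      have hklt : k < bN - p := by
        have := hk; rw [hlen1] at this; exact this
      have hjn : p + k < head.toList.length := by omega
      have hx := (hmem (p + k) (by omega) hjn).mp (by exact_mod_cast hin)
      rcases List.mem_cons.mp hx with hbad | hmembs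
      · have : p + k = bN := by exact_mod_cast hbad
        omega
      · have := hbsgt _ hmembs
        push_cast at this
        omega

-- ===== VERDICT (by name: the statement is the Claim_ definition above) =====
theorem tokenize_head_spec : Claim_equal_tokenize_head := by
  intro head cuts _
  show tokenize_head head cuts = tokenize_head_alt head cuts
  have hpair : (PySem.List.sorted cuts (fun x => x) false).Pairwise (· ≤ ·) := by
    simpa using PySem.List.sorted_pairwise (xs := cuts) (key := fun x => x)
  have hn0 : (0:Int) ≤ PySem.Str.len head := by simp [PySem.Str.len_eq]
  rw [tokenize_head, tokAloop_eq head _ 0 [] hpair le_rfl hn0,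
      chainTok_filter head _ 0 (sel_nodup _ _ 0)
        (fun b hb => ((mem_sel _ _ 0 b hpair).mp hb).2.2)]
  have hselmem : ∀ x : Int,
      x ∈ (sel (PySem.Str.len head) 0 (PySem.List.sorted cuts (fun x => x) false)).filter
            (fun b => decide (b < PySem.Str.len head))
        ↔ x ∈ cuts ∧ 0 < x ∧ x < (head.toList.length : Int) := by
    intro x
    rw [List.mem_filter, mem_sel _ _ 0 x hpair, PySem.List.mem_sorted, PySem.Str.len_eq]
    simp only [decide_eq_true_eq]
    constructor
    · rintro ⟨⟨h1, h2, _⟩, h4⟩; exact ⟨h1, h2, h4⟩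
    · rintro ⟨h1, h2, h3⟩; exact ⟨⟨h1, h2, le_of_lt h3⟩, h3⟩
  cases hlist : head.toList with
  | nil =>
    have hbnil : (sel (PySem.Str.len head) 0 (PySem.List.sorted cuts (fun x => x) false)).filter
        (fun b => decide (b < PySem.Str.len head)) = [] := by
      rw [List.eq_nil_iff_forall_not_mem]
      intro x hx
      have := (hselmem x).mp hx
      rw [hlist] at this
      simp at this
      omega
    rw [hbnil]
    simp only [List.nil_append, chainTok]
    have hlen0 : PySem.Str.len head = 0 := by rw [PySem.Str.len_eq, hlist]; rfl
    rw [hlen0, optTok_self head 0 hlen0.symm]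
    simp only [tokenize_head_alt, hlist, PySem.List.enumerate_nil, List.foldl_nil, tokBfin]
    norm_num [show PySem.Str.strip (String.ofList []) = "" from rfl]
  | cons c0 rest =>
    simp only [tokenize_head_alt, hlist, PySem.List.enumerate_cons, List.foldl_cons]
    have hstep0 : tokBstep (PySem.Set.ofList cuts) ([], []) (0, c0) = ([], [c0]) := by
      simp only [tokBstep]
      norm_num [show PySem.Str.strip (String.ofList []) = "" from rfl]
    rw [hstep0]
    have hrest : rest = head.toList.drop 1 := by rw [hlist]; rfl
    have hbuf1 : [c0] = (head.toList.drop 0).take (1 - 0) := by rw [hlist]; rfl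
    have h01 : (0:Int) + 1 = ((1:Nat):Int) := by norm_num
    have hrange : ∀ b ∈ (sel (PySem.Str.len head) 0 (PySem.List.sorted cuts fun x => x)).filter
        (fun b => decide (b < PySem.Str.len head)),
        ((1:Nat):Int) ≤ b ∧ b < (head.toList.length : Int) := by
      intro b hb
      have := (hselmem b).mp hb
      exact ⟨by push_cast; omega, this.2.2⟩
    have hmem : ∀ j : Nat, 1 ≤ j → j < head.toList.length →
        ((j:Int) ∈ PySem.Set.ofList cuts ↔
          (j:Int) ∈ (sel (PySem.Str.len head) 0 (PySem.List.sorted cuts fun x => x)).filter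
            (fun b => decide (b < PySem.Str.len head))) := by
      intro j hj1 hj2
      rw [hselmem, PySem.Set.mem_ofList]
      constructor
      · intro h; exact ⟨h, by exact_mod_cast hj1, by exact_mod_cast hj2⟩
      · intro h; exact h.1
    have hs := scan_chain head (PySem.Set.ofList cuts)
      ((sel (PySem.Str.len head) 0 (PySem.List.sorted cuts fun x => x)).filter
        (fun b => decide (b < PySem.Str.len head))) 0 1 []
      (by omega) (by rw [hlist]; simp) ((sel_nodup _ _ 0).filter _) hrange hmem
    rw [hrest, hbuf1, h01, hs]
    norm_num
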